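-- pv_equiv track=rewrite | github.com/kellyhyun/cs313e | Boxes.py | helper_nesting_function
-- ===== SOURCE A (Python) =====
-- def helper_nesting_function(box_list, box_1, box_2, max_list, each_max_list):
--   # determine maximum number of nested boxes and number of subsets when went through all boxes
--   if box_2 < 0:
--     max_num = max(each_max_list)
--     max_num_indeces = []
--     num_subsets = 0
--
--     # if the box fits none of the other boxes, return N(i) = 1 and number of subsets = 1
--     if max_num == 1:
--       return 1,1
--
--     # stores index values of the boxes that have the largest number of nested boxes
--     for i in range(len(each_max_list)):
--       if each_max_list[i] == max_num:
--         max_num_indeces.append(box_1 - i)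
--
--     for ind in max_num_indeces:
--       num_subsets += max_list[ind][1]
--
--     return max_num, num_subsets
--
--   # second box fits n the first box, then have the function run again
--   elif does_fit(box_list[box_2], box_list[box_1]):
--     each_max_list.append(max_list[box_2][0] + 1)
--     return helper_nesting_function(box_list, box_1, box_2 - 1, max_list, each_max_list)
--
--   # if the box doesn't fit then the list run through the fuction once more to the next box
--   else:
--     each_max_list.append(1)
--     return helper_nesting_function(box_list, box_1, box_2 - 1, max_list, each_max_list)
--
-- def does_fit (box1, box2):
--   return (box1[0] < box2[0] and box1[1] < box2[1] and box1[2] < box2[2])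
-- ===== SOURCE B (Python) =====
-- def does_fit(box1, box2):
--     return box1[0] < box2[0] and box1[1] < box2[1] and box1[2] < box2[2]
--
-- def helper_nesting_function(box_list, box_1, box_2, max_list, each_max_list):
--     # iterative version: walk b from box_2 down to 0, appending in place just like A
--     for b in range(box_2, -1, -1):
--         each_max_list.append(max_list[b][0] + 1 if does_fit(box_list[b], box_list[box_1]) else 1)
--     max_num = max(each_max_list)
--     if max_num == 1:
--         return 1, 1
--     inds = [box_1 - i for i, v in enumerate(each_max_list) if v == max_num]
--     return max_num, sum(max_list[ind][1] for ind in inds)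
-- ===== Notes on version B (the rewrite author's own statement) =====
-- stated objective: simpler
-- what changed: Replaces A's tail recursion with accumulator mutation by a plain downward for-loop, and A's two explicit index/accumulator loops in the base case by an enumerate comprehension plus sum().
import Mathlib
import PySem

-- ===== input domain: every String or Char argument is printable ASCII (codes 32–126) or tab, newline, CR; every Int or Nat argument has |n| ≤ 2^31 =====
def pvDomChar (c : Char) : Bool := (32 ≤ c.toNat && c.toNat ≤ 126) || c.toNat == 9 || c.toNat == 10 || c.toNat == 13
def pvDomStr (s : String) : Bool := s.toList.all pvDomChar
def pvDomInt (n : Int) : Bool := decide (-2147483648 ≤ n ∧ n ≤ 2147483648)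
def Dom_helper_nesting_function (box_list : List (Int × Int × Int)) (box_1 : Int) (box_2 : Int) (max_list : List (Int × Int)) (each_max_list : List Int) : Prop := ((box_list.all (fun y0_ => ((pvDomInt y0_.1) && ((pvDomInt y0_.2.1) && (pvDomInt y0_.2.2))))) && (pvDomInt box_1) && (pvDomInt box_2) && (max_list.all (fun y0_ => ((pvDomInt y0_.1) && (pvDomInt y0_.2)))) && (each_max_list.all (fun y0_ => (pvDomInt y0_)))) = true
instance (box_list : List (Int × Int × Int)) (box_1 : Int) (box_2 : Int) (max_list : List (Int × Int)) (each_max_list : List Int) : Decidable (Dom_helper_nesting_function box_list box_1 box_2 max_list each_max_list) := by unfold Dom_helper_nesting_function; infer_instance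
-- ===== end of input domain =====

-- B replaces A's recursion by an iterative loop plus a comprehension/sum (simpler decomposition, same cost);
-- both mutate each_max_list identically in Python; the theorems here are about the return value.

-- shared helper: literal port of Python does_fit (used by both ports, mirroring the shared Python helper)
def pvDoesFit (box1 box2 : Int × Int × Int) : Bool :=
  box1.1 < box2.1 && box1.2.1 < box2.2.1 && box1.2.2 < box2.2.2

-- ===== PORT A =====
-- literal port of A's recursion; pyGetD defaults are only reached outside Pre_ (Python raises there)
def helper_nesting_function (box_list : List (Int × Int × Int)) (box_1 : Int) (box_2 : Int) (max_list : List (Int × Int)) (each_max_list : List Int) : Int × Int :=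
  if h : box_2 < 0 then
    let max_num := (PySem.List.max? each_max_list (fun x => x)).getD 0  -- max([]) raises: excluded by Pre_
    if max_num = 1 then (1, 1)
    else
      let max_num_indeces := (PySem.List.pyRange 0 (each_max_list.length : Int) 1).foldl
        (fun acc i => if PySem.List.pyGetD each_max_list i 0 = max_num then acc ++ [box_1 - i] else acc) []
      let num_subsets := max_num_indeces.foldl
        (fun acc ind => acc + (PySem.List.pyGetD max_list ind (0, 0)).2) 0
      (max_num, num_subsets)
  else
    if pvDoesFit (PySem.List.pyGetD box_list box_2 (0, 0, 0)) (PySem.List.pyGetD box_list box_1 (0, 0, 0)) then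
      helper_nesting_function box_list box_1 (box_2 - 1) max_list
        (each_max_list ++ [(PySem.List.pyGetD max_list box_2 (0, 0)).1 + 1])
    else
      helper_nesting_function box_list box_1 (box_2 - 1) max_list (each_max_list ++ [1])
termination_by (box_2 + 1).toNat
decreasing_by all_goals (simp at h; omega)

-- ===== PORT B =====
def helper_nesting_function_alt (box_list : List (Int × Int × Int)) (box_1 : Int) (box_2 : Int) (max_list : List (Int × Int)) (each_max_list : List Int) : Int × Int :=
  let eml := (PySem.List.pyRange box_2 (-1) (-1)).foldl
    (fun acc b => acc ++ [if pvDoesFit (PySem.List.pyGetD box_list b (0, 0, 0)) (PySem.List.pyGetD box_list box_1 (0, 0, 0))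
                          then (PySem.List.pyGetD max_list b (0, 0)).1 + 1 else 1]) each_max_list
  let max_num := (PySem.List.max? eml (fun x => x)).getD 0
  if max_num = 1 then (1, 1)
  else
    let inds := (PySem.List.enumerate eml 0).filterMap
      (fun p => if p.2 = max_num then some (box_1 - p.1) else none)
    (max_num, (inds.map (fun ind => (PySem.List.pyGetD max_list ind (0, 0)).2)).sum)

-- ===== PRECONDITION & SPEC =====
-- value appended for index b (used only to state Pre_)
def pvVal (box_list : List (Int × Int × Int)) (box_1 : Int) (max_list : List (Int × Int)) (b : Int) : Int :=
  if pvDoesFit (PySem.List.pyGetD box_list b (0, 0, 0)) (PySem.List.pyGetD box_list box_1 (0, 0, 0))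
  then (PySem.List.pyGetD max_list b (0, 0)).1 + 1 else 1

-- the final contents of each_max_list (used only to state Pre_)
def pvFinal (box_list : List (Int × Int × Int)) (box_1 : Int) (box_2 : Int) (max_list : List (Int × Int)) (each_max_list : List Int) : List Int :=
  each_max_list ++ (PySem.List.pyRange box_2 (-1) (-1)).map (pvVal box_list box_1 max_list)

-- exactly the inputs on which Python A returns: all indexings in range and max() taken of a nonempty list
def Pre_helper_nesting_function (box_list : List (Int × Int × Int)) (box_1 : Int) (box_2 : Int) (max_list : List (Int × Int)) (each_max_list : List Int) : Prop :=
  (0 ≤ box_2 →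
     PySem.Raise.InRange box_list.length box_1 ∧ box_2 < (box_list.length : Int) ∧
     ∀ b ∈ PySem.List.pyRange box_2 (-1) (-1),
       pvDoesFit (PySem.List.pyGetD box_list b (0, 0, 0)) (PySem.List.pyGetD box_list box_1 (0, 0, 0)) = true →
       b < (max_list.length : Int)) ∧
  pvFinal box_list box_1 box_2 max_list each_max_list ≠ [] ∧
  ((PySem.List.max? (pvFinal box_list box_1 box_2 max_list each_max_list) (fun x => x)).getD 0 ≠ 1 →
     ∀ i ∈ PySem.List.pyRange 0 ((pvFinal box_list box_1 box_2 max_list each_max_list).length : Int) 1,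
       PySem.List.pyGetD (pvFinal box_list box_1 box_2 max_list each_max_list) i 0 =
         (PySem.List.max? (pvFinal box_list box_1 box_2 max_list each_max_list) (fun x => x)).getD 0 →
       PySem.Raise.InRange max_list.length (box_1 - i))
instance (box_list : List (Int × Int × Int)) (box_1 : Int) (box_2 : Int) (max_list : List (Int × Int)) (each_max_list : List Int) : Decidable (Pre_helper_nesting_function box_list box_1 box_2 max_list each_max_list) := by unfold Pre_helper_nesting_function; infer_instance

def pvWitness_helper_nesting_function : (List (Int × Int × Int)) × Int × Int × (List (Int × Int)) × List Int :=
  ([(1, 1, 1), (3, 3, 3)], 1, 0, [(2, 4), (1, 1)], [])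

def Spec_helper_nesting_function (box_list : List (Int × Int × Int)) (box_1 : Int) (box_2 : Int) (max_list : List (Int × Int)) (each_max_list : List Int) (out : Int × Int) : Prop := out = helper_nesting_function_alt box_list box_1 box_2 max_list each_max_list
instance (box_list : List (Int × Int × Int)) (box_1 : Int) (box_2 : Int) (max_list : List (Int × Int)) (each_max_list : List Int) (out : Int × Int) : Decidable (Spec_helper_nesting_function box_list box_1 box_2 max_list each_max_list out) := by unfold Spec_helper_nesting_function; infer_instance

-- ===== CLAIM (what is proved, stated in full; the proofs are below) =====
def Claim_equal_helper_nesting_function : Prop := ∀ (box_list : List (Int × Int × Int)) (box_1 : Int) (box_2 : Int) (max_list : List (Int × Int)) (each_max_list : List Int), Dom_helper_nesting_function box_list box_1 box_2 max_list each_max_list → Pre_helper_nesting_function box_list box_1 box_2 max_list each_max_list → Spec_helper_nesting_function box_list box_1 box_2 max_list each_max_list (helper_nesting_function box_list box_1 box_2 max_list each_max_list)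

-- ===== LEMMAS AND PROOFS =====

-- the conditional-append loop builds exactly a filterMap (Prop-valued test)
theorem loop_eq_filterMap {β : Type} (p : Int → Prop) [DecidablePred p] (f : Int → β)
    (l : List Int) (acc : List β) :
    l.foldl (fun a x => if p x then a ++ [f x] else a) acc =
      acc ++ l.filterMap (fun x => if p x then some (f x) else none) := by
  induction l generalizing acc with
  | nil => simp
  | cons x t ih => by_cases h : p x <;> simp [List.filterMap_cons, h, ih]

-- the generic base computation, as a named function for the induction
def pvFinish (box_1 : Int) (max_list : List (Int × Int)) (eml : List Int) : Int × Int :=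
  let max_num := (PySem.List.max? eml (fun x => x)).getD 0
  if max_num = 1 then (1, 1)
  else
    let inds := (PySem.List.enumerate eml 0).filterMap
      (fun p => if p.2 = max_num then some (box_1 - p.1) else none)
    (max_num, (inds.map (fun ind => (PySem.List.pyGetD max_list ind (0, 0)).2)).sum)

-- A's base branch never looks at box_list/box_2, so it is pvFinish
theorem A_base (box_list : List (Int × Int × Int)) (box_1 box_2 : Int) (max_list : List (Int × Int))
    (eml : List Int) (h : box_2 < 0) :
    helper_nesting_function box_list box_1 box_2 max_list eml = pvFinish box_1 max_list eml := by
  rw [helper_nesting_function, dif_pos h]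
  unfold pvFinish
  by_cases h1 : (PySem.List.max? eml (fun x => x)).getD 0 = 1
  · simp [h1]
  · simp only [h1, if_neg h1]
    refine congrArg (fun z => ((PySem.List.max? eml (fun x => x)).getD 0, z)) ?_
    rw [loop_eq_filterMap
          (fun i => PySem.List.pyGetD eml i 0 = (PySem.List.max? eml (fun x => x)).getD 0)
          (fun i => box_1 - i)]
    simp only [List.nil_append]
    rw [PySem.List.foldl_add, zero_add]
    rw [PySem.List.enumerate_eq_map_pyRange eml 0, List.filterMap_map]
    rfl

-- A's recursion accumulates exactly the pvVal values of box_2, box_2-1, …, 0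
theorem A_eq_finish (box_list : List (Int × Int × Int)) (box_1 : Int) (max_list : List (Int × Int)) :
    ∀ (k : Nat) (box_2 : Int), (box_2 + 1).toNat = k → ∀ (eml : List Int),
      helper_nesting_function box_list box_1 box_2 max_list eml =
        pvFinish box_1 max_list (eml ++ (PySem.List.pyRange box_2 (-1) (-1)).map (pvVal box_list box_1 max_list)) := by
  intro k
  induction k with
  | zero =>
    intro box_2 hk eml
    have h : box_2 < 0 := by omega
    rw [PySem.List.pyRange_neg_one_eq_nil (by omega)]
    simp only [List.map_nil, List.append_nil]
    exact A_base box_list box_1 box_2 max_list eml h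
  | succ k ih =>
    intro box_2 hk eml
    have h : 0 ≤ box_2 := by omega
    rw [PySem.List.pyRange_neg_one_cons (by omega)]
    rw [helper_nesting_function, dif_neg (by omega)]
    simp only [List.map_cons]
    rw [show eml ++ (pvVal box_list box_1 max_list box_2 ::
          (PySem.List.pyRange (box_2 - 1) (-1) (-1)).map (pvVal box_list box_1 max_list)) =
        (eml ++ [pvVal box_list box_1 max_list box_2]) ++
          (PySem.List.pyRange (box_2 - 1) (-1) (-1)).map (pvVal box_list box_1 max_list) by simp]
    by_cases hf : pvDoesFit (PySem.List.pyGetD box_list box_2 (0, 0, 0)) (PySem.List.pyGetD box_list box_1 (0, 0, 0))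
    · rw [if_pos hf]
      rw [ih (box_2 - 1) (by omega)]
      simp [pvVal, hf]
    · rw [if_neg hf]
      rw [ih (box_2 - 1) (by omega)]
      simp [pvVal, hf]

-- B computes pvFinish of the same final list
theorem B_eq_finish (box_list : List (Int × Int × Int)) (box_1 box_2 : Int) (max_list : List (Int × Int))
    (eml : List Int) :
    helper_nesting_function_alt box_list box_1 box_2 max_list eml =
      pvFinish box_1 max_list (eml ++ (PySem.List.pyRange box_2 (-1) (-1)).map (pvVal box_list box_1 max_list)) := by
  unfold helper_nesting_function_alt pvFinish
  rw [PySem.List.foldl_append_singleton_eq_map]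
  rfl

-- ===== VERDICT (by name: the statement is the Claim_ definition above) =====
theorem helper_nesting_function_spec : Claim_equal_helper_nesting_function := by
  intro box_list box_1 box_2 max_list each_max_list _ _
  unfold Spec_helper_nesting_function
  rw [A_eq_finish box_list box_1 max_list (box_2 + 1).toNat box_2 rfl each_max_list,
      B_eq_finish]
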